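-- pv_equiv track=rewrite | github.com/Oyler/ITAM-Primavera-2021 | Simulacion/GLC.py | has_complete_cycle
-- ===== SOURCE A (Python) =====
-- from math import gcd, sqrt
--
-- def prime_factors(n):
--     factors = [1]
--     if n % 2 == 0:
--         factors.append(2)
--         while n % 2 == 0:
--             n = int(n / 2)
--     for i in range(3, int(sqrt(n)) + 1, 2):
--         if n % i == 0:
--             factors.append(i)
--             while n % i == 0:
--                 n = int(n / i)
--     if n > 2:
--         factors.append(n)
--     return factors
--
-- def has_complete_cycle(mod, mult, c):
--     flag = True
--     reason = "Has complete cycle"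
--     if gcd(mod, c) != 1:
--         flag = False
--         reason = f"gcd({mod}, {c}) is not 1"
--
--     if flag:
--         for f in prime_factors(mod):
--             if (mult - 1) % f != 0:
--                 flag = False
--                 reason = f"factor {f} does not divide {mult} - 1"
--                 break
--     if flag:
--         if mod % 4 == 0 and mult % 4 != 1:
--             flag = False
--             reason = f"4 divides {mod} but not {mult} - 1"
--     return flag, reason
-- ===== SOURCE B (Python) =====
-- from math import gcd
--
-- def _spf(n):
--     # smallest prime factor of n >= 2
--     f = 2
--     while f * f <= n:
--         if n % f == 0:
--             return f
--         f += 1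
--     return n
--
-- def has_complete_cycle(mod, mult, c):
--     if gcd(mod, c) != 1:
--         return False, f"gcd({mod}, {c}) is not 1"
--     # gcd-squeeze: remove from mod every prime that divides mult-1, without factoring
--     n = mod
--     while (g := gcd(n, mult - 1)) > 1:
--         n //= g
--     if n > 1:
--         f = _spf(n)
--         return False, f"factor {f} does not divide {mult} - 1"
--     if mod % 4 == 0 and mult % 4 != 1:
--         return False, f"4 divides {mod} but not {mult} - 1"
--     return True, "Has complete cycle"
-- ===== Notes on version B (the rewrite author's own statement) =====
-- stated objective: alternative
-- what changed: B never factors mod: a gcd-squeeze loop (n //= gcd(n, mult-1) until the gcd is 1) removes every prime shared with mult-1, so the Hull-Dobell factor test reduces to 'residual == 1'; only on failure is the residual's smallest prime factor searched to produce A's exact reason string.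
import Mathlib
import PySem

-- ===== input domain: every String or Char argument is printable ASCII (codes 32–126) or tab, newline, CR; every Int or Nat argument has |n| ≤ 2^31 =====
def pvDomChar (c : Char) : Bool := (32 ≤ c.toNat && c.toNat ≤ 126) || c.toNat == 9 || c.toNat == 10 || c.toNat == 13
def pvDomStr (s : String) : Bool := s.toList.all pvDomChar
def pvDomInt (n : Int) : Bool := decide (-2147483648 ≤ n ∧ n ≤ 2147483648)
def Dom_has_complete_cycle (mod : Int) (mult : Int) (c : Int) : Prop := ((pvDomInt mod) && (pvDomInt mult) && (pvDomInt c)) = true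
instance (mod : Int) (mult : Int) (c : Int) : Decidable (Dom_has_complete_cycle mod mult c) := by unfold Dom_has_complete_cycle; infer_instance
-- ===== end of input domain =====

-- B replaces A's full trial-division factorisation of mod by a gcd-squeeze loop (no factoring at
-- all on success; a smallest-prime-factor search only on failure); return values proved equal on Pre_.

-- ===== PORT A =====
-- 'while n % i == 0: n = int(n / i)': on the admitted domain (1 ≤ n ≤ 2^31) int(n/i) for i ∣ n is
-- exact integer division, so '/' on Int is exact here.  Guard '1 ≤ n' only makes the loop total
-- (Pre_ keeps inputs where the Python loop would not terminate out of the claim).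
lemma ediv_lt_base (n f : Int) (hf : 2 ≤ f) (hn : 1 ≤ n) : n / f < n := by
  have h0 : (0:Int) < n := lt_of_lt_of_le zero_lt_one hn
  have h1 : (1:Int) < f := lt_of_lt_of_le one_lt_two hf
  have h2 : n < n * f := by
    have h3 := mul_lt_mul_of_pos_left h1 h0
    rwa [mul_one] at h3
  exact (Int.ediv_lt_iff_lt_mul (lt_trans zero_lt_one h1)).2 h2

lemma two_mul_le_sq (f : Int) (hf : 2 ≤ f) : 2 * f ≤ f * f :=
  mul_le_mul_of_nonneg_right hf (le_trans zero_le_two hf)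

lemma pvStrip_dec (n f : Int) (h : 2 ≤ f ∧ 1 ≤ n ∧ n % f = 0) :
    (n / f).toNat < n.toNat :=
  (Int.toNat_lt_toNat (lt_of_lt_of_le zero_lt_one h.2.1)).2 (ediv_lt_base n f h.1 h.2.1)

def pvStrip (n f : Int) : Int :=
  if h : 2 ≤ f ∧ 1 ≤ n ∧ n % f = 0 then pvStrip (n / f) f else n
termination_by n.toNat
decreasing_by exact pvStrip_dec n f h

-- loop body of the 'for i in range(3, int(sqrt(n)) + 1, 2)' loop in prime_factors
def pvAstep (st : Int × List Int) (i : Int) : Int × List Int :=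
  if st.1 % i = 0 then (pvStrip st.1 i, st.2 ++ [i]) else st

def prime_factors (n : Int) : List Int :=
  let factors : List Int := [1]
  let p := if n % 2 = 0 then (pvStrip n 2, factors ++ [2]) else (n, factors)
  -- int(sqrt(n)): math.sqrt is correctly rounded, hence int(sqrt(n)) = isqrt(n) for 0 ≤ n ≤ 2^31
  let r : Int := (Nat.sqrt p.1.toNat : Int)
  let q := (PySem.List.pyRange 3 (r + 1) 2).foldl pvAstep p
  if q.1 > 2 then q.2 ++ [q.1] else q.2

def has_complete_cycle (mod : Int) (mult : Int) (c : Int) : Bool × String :=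
  let st : Bool × String := (true, "Has complete cycle")
  let st := if Int.gcd mod c ≠ 1 then
      (false, "gcd(" ++ PySem.Int.toStr mod ++ ", " ++ PySem.Int.toStr c ++ ") is not 1")
    else st
  -- '%' divisors below (f > 0, 4) are positive, where Lean's emod agrees with Python's %
  let st := if st.1 then
      (prime_factors mod).foldl (fun s f =>
        if s.1 then
          (if (mult - 1) % f ≠ 0 then
            (false, "factor " ++ PySem.Int.toStr f ++ " does not divide " ++ PySem.Int.toStr mult ++ " - 1")
          else s)
        else s) st
    else st
  if st.1 then
    (if mod % 4 = 0 ∧ mult % 4 ≠ 1 then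
      (false, "4 divides " ++ PySem.Int.toStr mod ++ " but not " ++ PySem.Int.toStr mult ++ " - 1")
    else st)
  else st

-- ===== PORT B =====
-- 'while (g := gcd(n, mult - 1)) > 1: n //= g' — the dif guard '1 ≤ n' only makes the loop total
-- (Python would loop forever only for n ≤ 0, which Pre_ excludes); math.gcd is nonnegative = Int.gcd.
def bReduce (m n : Int) : Int :=
  if h : 1 < Int.gcd n m ∧ 1 ≤ n then bReduce m (n / (Int.gcd n m : Int)) else n
termination_by n.toNat
decreasing_by
  have hg2 : (2:Int) ≤ (Int.gcd n m : Int) := by exact_mod_cast h.1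
  have := ediv_lt_base n _ hg2 h.2
  omega

-- _spf: 'f = 2; while f*f <= n: if n % f == 0: return f; f += 1; return n' — the '2 ≤ f' guard
-- only serves termination (the Python loop always has f ≥ 2)
def bSpf (n f : Int) : Int :=
  if h : f * f ≤ n ∧ 2 ≤ f then (if n % f = 0 then f else bSpf n (f + 1)) else n
termination_by (n - f).toNat
decreasing_by
  have h2 : 2 * f ≤ f * f := two_mul_le_sq f h.2
  omega

def has_complete_cycle_alt (mod : Int) (mult : Int) (c : Int) : Bool × String :=
  if Int.gcd mod c ≠ 1 then
    (false, "gcd(" ++ PySem.Int.toStr mod ++ ", " ++ PySem.Int.toStr c ++ ") is not 1")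
  else
    let n := bReduce (mult - 1) mod
    if 1 < n then
      (false, "factor " ++ PySem.Int.toStr (bSpf n 2) ++ " does not divide " ++ PySem.Int.toStr mult ++ " - 1")
    else if mod % 4 = 0 ∧ mult % 4 ≠ 1 then
      (false, "4 divides " ++ PySem.Int.toStr mod ++ " but not " ++ PySem.Int.toStr mult ++ " - 1")
    else (true, "Has complete cycle")

-- ===== PRECONDITION & SPEC =====
-- Pre_ excludes exactly the inputs where Python A does not return: for mod ≤ 0 with gcd(mod,c) = 1
-- A either loops forever (mod = 0, |c| = 1) or raises ValueError (math.sqrt of a negative number).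
def Pre_has_complete_cycle (mod : Int) (mult : Int) (c : Int) : Prop := 1 ≤ mod ∨ Int.gcd mod c ≠ 1
instance (mod : Int) (mult : Int) (c : Int) : Decidable (Pre_has_complete_cycle mod mult c) := by
  unfold Pre_has_complete_cycle; infer_instance
def pvWitness_has_complete_cycle : Int × Int × Int := (8, 5, 3)

def Spec_has_complete_cycle (mod : Int) (mult : Int) (c : Int) (out : Bool × String) : Prop := out = has_complete_cycle_alt mod mult c
instance (mod : Int) (mult : Int) (c : Int) (out : Bool × String) : Decidable (Spec_has_complete_cycle mod mult c out) := by unfold Spec_has_complete_cycle; infer_instance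

-- ===== CLAIM (what is proved, stated in full; the proofs are below) =====
def Claim_equal_has_complete_cycle : Prop := ∀ (mod : Int) (mult : Int) (c : Int), Dom_has_complete_cycle mod mult c → Pre_has_complete_cycle mod mult c → Spec_has_complete_cycle mod mult c (has_complete_cycle mod mult c)

-- ===== LEMMAS AND PROOFS =====

-- the 'is (mult-1) % f nonzero' test, as a Bool predicate
def badP (mult f : Int) : Bool := decide ((mult - 1) % f ≠ 0)

-- A's failure message for a factor f
def pvMsgF (mult f : Int) : String :=
  "factor " ++ PySem.Int.toStr f ++ " does not divide " ++ PySem.Int.toStr mult ++ " - 1"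

-- A's inner-loop body, named
def pvAfold (mult : Int) (st : Bool × String) (f : Int) : Bool × String :=
  if st.1 then (if (mult - 1) % f ≠ 0 then (false, pvMsgF mult f) else st) else st

lemma badP_false_iff (mult f : Int) : badP mult f = false ↔ f ∣ (mult - 1) := by
  constructor
  · intro h
    exact Int.dvd_of_emod_eq_zero (by simpa [badP] using h)
  · intro h
    simp [badP, Int.emod_eq_zero_of_dvd h]

lemma ediv_one_le_of_dvd {m f : Int} (hf : 2 ≤ f) (hm : 1 ≤ m) (hd : f ∣ m) : 1 ≤ m / f := by
  obtain ⟨q, rfl⟩ := hd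
  rw [Int.mul_ediv_cancel_left _ (by omega)]
  nlinarith

lemma pvStrip_le (n f : Int) : pvStrip n f ≤ n := by
  fun_induction pvStrip n f with
  | case1 m h ih => exact le_trans ih (Int.ediv_le_self f (le_trans zero_le_one h.2.1))
  | case2 m h => exact le_refl m

lemma pvStrip_pos (f n : Int) (hf : 2 ≤ f) : 1 ≤ n → 1 ≤ pvStrip n f := by
  fun_induction pvStrip n f with
  | case1 m h ih =>
    intro _
    exact ih (ediv_one_le_of_dvd hf h.2.1 (Int.dvd_of_emod_eq_zero h.2.2))
  | case2 m h => intro hm; exact hm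

lemma pvStrip_dvd (f n : Int) : pvStrip n f ∣ n := by
  fun_induction pvStrip n f with
  | case1 m h ih =>
    have hd : f ∣ m := Int.dvd_of_emod_eq_zero h.2.2
    exact ih.trans ⟨f, (Int.ediv_mul_cancel hd).symm⟩
  | case2 m h => exact dvd_refl m

lemma pvStrip_ndvd (f n : Int) (hf : 2 ≤ f) : 1 ≤ n → ¬ f ∣ pvStrip n f := by
  fun_induction pvStrip n f with
  | case1 m h ih =>
    intro _
    exact ih (ediv_one_le_of_dvd hf h.2.1 (Int.dvd_of_emod_eq_zero h.2.2))
  | case2 m h =>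
    intro hm hdvd
    exact h ⟨hf, hm, Int.emod_eq_zero_of_dvd hdvd⟩

-- a prime p not dividing f divides pvStrip n f iff it divides n
lemma pvStrip_dvd_iff (p f n : Int) (hp : Prime p) (hpf : ¬ p ∣ f) :
    (p ∣ pvStrip n f ↔ p ∣ n) := by
  fun_induction pvStrip n f with
  | case1 m h ih =>
    have hfd : f ∣ m := Int.dvd_of_emod_eq_zero h.2.2
    have hm : m = (m / f) * f := (Int.ediv_mul_cancel hfd).symm
    rw [ih]
    constructor
    · intro hq; rw [hm]; exact hq.mul_right f
    · intro hq
      rcases (hp.dvd_mul).1 (hm ▸ hq) with hq1 | hq1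
      · exact hq1
      · exact absurd hq1 hpf
  | case2 m h => exact Iff.rfl

lemma pyRange2_nil (a b : Int) (h : b ≤ a) : PySem.List.pyRange a b 2 = [] := by
  rw [PySem.List.pyRange_of_pos a b (by norm_num), if_neg (by omega)]
  simp

lemma pyRange2_cons (a b : Int) (h : a < b) :
    PySem.List.pyRange a b 2 = a :: PySem.List.pyRange (a + 2) b 2 := by
  rw [PySem.List.pyRange_of_pos a b (by norm_num),
      PySem.List.pyRange_of_pos (a + 2) b (by norm_num), if_pos h]
  by_cases h2 : a + 2 < b
  · rw [if_pos h2]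
    have hN : ((b - a + 2 - 1) / 2).toNat = ((b - (a + 2) + 2 - 1) / 2).toNat + 1 := by omega
    rw [hN, List.range_succ_eq_map, List.map_cons, List.map_map]
    congr 1
    · norm_num
    · apply List.map_congr_left
      intro k _
      simp only [Function.comp_apply]
      push_cast
      ring
  · rw [if_neg h2]
    have hN : ((b - a + 2 - 1) / 2).toNat = 1 := by omega
    rw [hN]
    simp

-- a number ≥ 2 with no divisor strictly between 1 and itself is prime
lemma prime_of_no_small_divisor (p : Int) (h2 : 2 ≤ p)
    (h : ∀ d : Int, 2 ≤ d → d < p → ¬ d ∣ p) : Prime p := by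
  rw [Int.prime_iff_natAbs_prime]
  rw [Nat.prime_def_lt]
  refine ⟨by omega, ?_⟩
  intro m hm hmd
  by_contra hm1
  have hm0 : m ≠ 0 := by
    rintro rfl
    have := Nat.eq_zero_of_zero_dvd hmd
    omega
  have hm2 : 2 ≤ (m : Int) := by omega
  have hmp : (m : Int) < p := by omega
  have : (m : Int) ∣ p := by
    have h1 : (m : Int) ∣ (p.natAbs : Int) := Int.natCast_dvd_natCast.2 hmd
    rwa [Int.natAbs_of_nonneg (by omega)] at h1
  exact h m hm2 hmp this

-- any proper divisor of n yields a divisor m with m*m ≤ n, m ≤ d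
lemma small_divisor (n d : Int) (hn : 1 ≤ n) (h2 : 2 ≤ d) (hlt : d < n) (hd : d ∣ n) :
    ∃ m : Int, 2 ≤ m ∧ m ∣ n ∧ m * m ≤ n ∧ m ≤ d := by
  obtain ⟨e, he⟩ := hd
  have he2 : 2 ≤ e := by nlinarith
  by_cases hdd : d * d ≤ n
  · exact ⟨d, h2, ⟨e, he⟩, hdd, le_refl d⟩
  · refine ⟨e, he2, ⟨d, by rw [he]; ring⟩, ?_, by nlinarith⟩
    nlinarith

-- ========== correctness of A's trial-division loop ==========
-- exhausted range: the residual n is 1 or a prime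
lemma aBase (R f n : Int) (acc : List Int) (hfR : R + 1 ≤ f) (h1 : 1 ≤ n) (h3 : 3 ≤ f)
    (hnd : ∀ d : Int, 2 ≤ d → d < f → ¬ d ∣ n)
    (hsq : ∀ g : Int, 0 ≤ g → g * g ≤ n → g ≤ R) :
    ∃ T : List Int,
      (let q := (PySem.List.pyRange f (R + 1) 2).foldl pvAstep (n, acc);
       (if q.1 > 2 then q.2 ++ [q.1] else q.2) = acc ++ T)
      ∧ T.Pairwise (· < ·)
      ∧ (∀ x ∈ T, f ≤ x ∧ Prime x ∧ x ∣ n)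
      ∧ (∀ p : Int, 2 ≤ p → Prime p → p ∣ n → p ∈ T) := by
  have hnil := pyRange2_nil f (R + 1) hfR
  by_cases hn2 : 2 < n
  · have dsmall : ∀ d : Int, 2 ≤ d → d < n → ¬ d ∣ n := by
      intro d hd2 hdn hdd
      obtain ⟨m, hm2, hmd, hmm, _⟩ := small_divisor n d h1 hd2 hdn hdd
      have hmR := hsq m (by omega) hmm
      exact hnd m hm2 (by omega) hmd
    have hfn : f ≤ n := by
      by_contra hc
      exact hnd n (by omega) (by omega) (dvd_refl n)
    refine ⟨[n], ?_, ?_, ?_, ?_⟩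
    · simp [hnil, hn2]
    · simp
    · intro x hx
      have hxn : x = n := by simpa using hx
      rw [hxn]
      exact ⟨hfn, prime_of_no_small_divisor n (by omega) dsmall, dvd_refl n⟩
    · intro p hp2 hpp hpd
      have hple : p ≤ n := Int.le_of_dvd (by omega) hpd
      have hpn : p = n := by
        by_contra hc
        exact dsmall p hp2 (by omega) hpd
      simp [hpn]
  · have hne2 : n ≠ 2 := by
      intro hc
      exact hnd 2 le_rfl (by omega) (by rw [hc])
    have hn1 : n = 1 := by omega
    subst hn1
    refine ⟨[], by simp [hnil], by simp, by simp, ?_⟩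
    intro p hp2 _ hpd
    have := Int.le_of_dvd one_pos hpd
    omega

-- the fold over range(f, R+1, 2) appends exactly the (sorted) primes of n, plus the residual
lemma aLoop (R : Int) : ∀ k : Nat, ∀ f n : Int, ∀ acc : List Int,
    (R + 1 - f).toNat ≤ k → 1 ≤ n → 3 ≤ f → f % 2 = 1 →
    (∀ d : Int, 2 ≤ d → d < f → ¬ d ∣ n) →
    (∀ g : Int, 0 ≤ g → g * g ≤ n → g ≤ R) →
    ∃ T : List Int,
      (let q := (PySem.List.pyRange f (R + 1) 2).foldl pvAstep (n, acc);
       (if q.1 > 2 then q.2 ++ [q.1] else q.2) = acc ++ T)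
      ∧ T.Pairwise (· < ·)
      ∧ (∀ x ∈ T, f ≤ x ∧ Prime x ∧ x ∣ n)
      ∧ (∀ p : Int, 2 ≤ p → Prime p → p ∣ n → p ∈ T) := by
  intro k
  induction k with
  | zero =>
    intro f n acc hk h1 h3 hodd hnd hsq
    exact aBase R f n acc (by omega) h1 h3 hnd hsq
  | succ k ih =>
    intro f n acc hk h1 h3 hodd hnd hsq
    by_cases hfR : R + 1 ≤ f
    · exact aBase R f n acc hfR h1 h3 hnd hsq
    · have hcons := pyRange2_cons f (R + 1) (by omega)
      by_cases hdv : n % f = 0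
      · -- f divides n: f is prime, gets appended, n is stripped
        have hfdvd : f ∣ n := Int.dvd_of_emod_eq_zero hdv
        have hfprime : Prime f :=
          prime_of_no_small_divisor f (by omega)
            (fun d hd2 hdf hdd => hnd d hd2 hdf (hdd.trans hfdvd))
        have h1' : 1 ≤ pvStrip n f := pvStrip_pos f n (by omega) h1
        have two_div : (2:Int) ∣ (f + 1) := Int.dvd_of_emod_eq_zero (by omega)
        have hnd' : ∀ d : Int, 2 ≤ d → d < f + 2 → ¬ d ∣ pvStrip n f := by
          intro d hd2 hdf2 hdd
          by_cases hdf : d < f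
          · exact hnd d hd2 hdf (hdd.trans (pvStrip_dvd f n))
          · by_cases hde : d = f
            · exact pvStrip_ndvd f n (by omega) h1 (hde ▸ hdd)
            · have hde1 : d = f + 1 := by omega
              subst hde1
              exact hnd 2 le_rfl (by omega)
                (((two_div.trans hdd)).trans (pvStrip_dvd f n))
        have hsq' : ∀ g : Int, 0 ≤ g → g * g ≤ pvStrip n f → g ≤ R :=
          fun g hg0 hgg => hsq g hg0 (le_trans hgg (pvStrip_le n f))
        obtain ⟨T', heq', hpw', hsound', hcomp'⟩ :=
          ih (f + 2) (pvStrip n f) (acc ++ [f]) (by omega) h1' (by omega) (by omega) hnd' hsq'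
        refine ⟨f :: T', ?_, ?_, ?_, ?_⟩
        · simp only [hcons, List.foldl_cons, pvAstep, hdv, if_pos]
          simp only [] at heq' ⊢
          rw [heq']
          simp
        · exact List.pairwise_cons.2
            ⟨fun x hx => by have := (hsound' x hx).1; omega, hpw'⟩
        · intro x hx
          rcases List.mem_cons.1 hx with h | h
          · rw [h]
            exact ⟨le_refl f, hfprime, hfdvd⟩
          · obtain ⟨hx1, hx2, hx3⟩ := hsound' x h
            exact ⟨by omega, hx2, hx3.trans (pvStrip_dvd f n)⟩
        · intro p hp2 hpp hpn
          by_cases hpf : p = f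
          · simp [hpf]
          · have hnpf : ¬ p ∣ f := by
              intro hd
              have := Int.le_of_dvd (by omega) hd
              exact hnd p hp2 (by omega) hpn
            have hpn' : p ∣ pvStrip n f := (pvStrip_dvd_iff p f n hpp hnpf).2 hpn
            exact List.mem_cons_of_mem _ (hcomp' p hp2 hpp hpn')
      · -- f does not divide n: nothing happens at this step
        have hnd' : ∀ d : Int, 2 ≤ d → d < f + 2 → ¬ d ∣ n := by
          intro d hd2 hdf2 hdd
          by_cases hdf : d < f
          · exact hnd d hd2 hdf hdd
          · by_cases hde : d = f
            · exact hdv (Int.emod_eq_zero_of_dvd (hde ▸ hdd))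
            · have hde1 : d = f + 1 := by omega
              subst hde1
              exact hnd 2 le_rfl (by omega)
                (Int.dvd_of_emod_eq_zero (show (f+1) % 2 = 0 by omega) |>.trans hdd)
        obtain ⟨T', heq', hpw', hsound', hcomp'⟩ :=
          ih (f + 2) n acc (by omega) h1 (by omega) (by omega) hnd' hsq
        refine ⟨T', ?_, hpw', ?_, hcomp'⟩
        · simp only [hcons, List.foldl_cons, pvAstep, hdv, if_neg, if_false]
          exact heq'
        · intro x hx
          obtain ⟨hx1, hx2, hx3⟩ := hsound' x hx
          exact ⟨by omega, hx2, hx3⟩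

-- 0 ≤ g, g*g ≤ m imply g ≤ isqrt m
lemma hsqgen (m : Int) (hm1 : 1 ≤ m) (g : Int) (hg0 : 0 ≤ g) (hgg : g * g ≤ m) :
    g ≤ ((Nat.sqrt m.toNat : Nat) : Int) := by
  have hgt : g.toNat * g.toNat ≤ m.toNat := by
    have h1 : ((g.toNat * g.toNat : Nat) : Int) ≤ ((m.toNat : Nat) : Int) := by
      push_cast
      rw [Int.toNat_of_nonneg hg0, Int.toNat_of_nonneg (by omega : (0:Int) ≤ m)]
      exact hgg
    exact_mod_cast h1
  have := Nat.le_sqrt.2 hgt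
  omega

-- prime_factors mod = 1 :: L with L the sorted distinct primes of mod
lemma PF (mod : Int) (hm : 1 ≤ mod) :
    ∃ L : List Int, prime_factors mod = 1 :: L ∧ L.Pairwise (· < ·)
      ∧ (∀ x ∈ L, 2 ≤ x ∧ Prime x ∧ x ∣ mod)
      ∧ (∀ p : Int, 2 ≤ p → Prime p → p ∣ mod → p ∈ L) := by
  by_cases he : mod % 2 = 0
  · -- even: strip the 2s first, then the odd loop runs on pvStrip mod 2
    have hn1 : 1 ≤ pvStrip mod 2 := pvStrip_pos 2 mod le_rfl hm
    have hnd : ∀ d : Int, 2 ≤ d → d < 3 → ¬ d ∣ pvStrip mod 2 := by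
      intro d hd2 hd3 hdd
      have hde : d = 2 := by omega
      exact pvStrip_ndvd 2 mod le_rfl hm (hde ▸ hdd)
    obtain ⟨T, heq, hpw, hsound, hcomp⟩ :=
      aLoop ((Nat.sqrt (pvStrip mod 2).toNat : Nat) : Int)
        (((Nat.sqrt (pvStrip mod 2).toNat : Nat) : Int) + 1 - 3).toNat 3 (pvStrip mod 2)
        [1, 2] le_rfl hn1 le_rfl (by norm_num) hnd
        (hsqgen (pvStrip mod 2) hn1)
    refine ⟨2 :: T, ?_, ?_, ?_, ?_⟩
    · simp only [prime_factors, he, if_pos, reduceIte]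
      have h12 : ([1] ++ [2] : List Int) = [1, 2] := rfl
      rw [h12, heq]
      simp
    · exact List.pairwise_cons.2
        ⟨fun x hx => by have := (hsound x hx).1; omega, hpw⟩
    · intro x hx
      rcases List.mem_cons.1 hx with h | h
      · subst h
        exact ⟨le_rfl, Int.prime_two, Int.dvd_of_emod_eq_zero he⟩
      · obtain ⟨hx1, hx2, hx3⟩ := hsound x h
        exact ⟨by omega, hx2, hx3.trans (pvStrip_dvd 2 mod)⟩
    · intro p hp2 hpp hpd
      by_cases hpe : p = 2
      · simp [hpe]
      · have hnp2 : ¬ p ∣ (2:Int) := by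
          intro hd
          have := Int.le_of_dvd two_pos hd
          omega
        have hp' : p ∣ pvStrip mod 2 := (pvStrip_dvd_iff p 2 mod hpp hnp2).2 hpd
        exact List.mem_cons_of_mem _ (hcomp p hp2 hpp hp')
  · -- odd: the loop runs on mod itself
    have hnd : ∀ d : Int, 2 ≤ d → d < 3 → ¬ d ∣ mod := by
      intro d hd2 hd3 hdd
      have hde : d = 2 := by omega
      exact he (Int.emod_eq_zero_of_dvd (hde ▸ hdd))
    obtain ⟨T, heq, hpw, hsound, hcomp⟩ :=
      aLoop ((Nat.sqrt mod.toNat : Nat) : Int)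
        (((Nat.sqrt mod.toNat : Nat) : Int) + 1 - 3).toNat 3 mod
        [1] le_rfl hm le_rfl (by norm_num) hnd (hsqgen mod hm)
    refine ⟨T, ?_, hpw, ?_, hcomp⟩
    · simp only [prime_factors, he, if_neg, reduceIte]
      rw [heq]
      simp
    · intro x hx
      obtain ⟨hx1, hx2, hx3⟩ := hsound x hx
      exact ⟨by omega, hx2, hx3⟩

-- ========== correctness of B's gcd-squeeze ==========
lemma bReduce_spec (m : Int) : ∀ n : Int, 1 ≤ n →
    1 ≤ bReduce m n ∧ bReduce m n ∣ n ∧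
      (∀ p : Int, 2 ≤ p → Prime p → (p ∣ bReduce m n ↔ (p ∣ n ∧ ¬ p ∣ m))) := by
  intro n
  fun_induction bReduce m n with
  | case1 n h ih =>
    intro _
    have hg2 : (2:Int) ≤ (Int.gcd n m : Int) := by exact_mod_cast h.1
    have hgd : ((Int.gcd n m : Int)) ∣ n := Int.gcd_dvd_left n m
    have hgm : ((Int.gcd n m : Int)) ∣ m := Int.gcd_dvd_right n m
    have hdivd : n / (Int.gcd n m : Int) ∣ n := ⟨(Int.gcd n m : Int), (Int.ediv_mul_cancel hgd).symm⟩
    have hn' : 1 ≤ n / (Int.gcd n m : Int) := ediv_one_le_of_dvd hg2 h.2 hgd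
    obtain ⟨ih1, ih2, ih3⟩ := ih hn'
    refine ⟨ih1, ih2.trans hdivd, ?_⟩
    intro p hp2 hpp
    rw [ih3 p hp2 hpp]
    constructor
    · rintro ⟨hpq, hpm⟩
      exact ⟨hpq.trans hdivd, hpm⟩
    · rintro ⟨hpn, hpm⟩
      refine ⟨?_, hpm⟩
      have hpg : ¬ p ∣ (Int.gcd n m : Int) := fun hd => hpm (hd.trans hgm)
      have heq : n = (n / (Int.gcd n m : Int)) * (Int.gcd n m : Int) :=
        (Int.ediv_mul_cancel hgd).symm
      rcases (hpp.dvd_mul).1 (heq ▸ hpn) with h1 | h1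
      · exact h1
      · exact absurd h1 hpg
  | case2 n h =>
    intro hn
    refine ⟨hn, dvd_refl n, ?_⟩
    intro p hp2 hpp
    constructor
    · intro hpn
      refine ⟨hpn, ?_⟩
      intro hpm
      have hpg : p ∣ (Int.gcd n m : Int) := by
        have hp0 : ((p.toNat : Nat) : Int) = p := Int.toNat_of_nonneg (by omega)
        have h1 : ((p.toNat : Nat) : Int) ∣ n := hp0 ▸ hpn
        have h2 : ((p.toNat : Nat) : Int) ∣ m := hp0 ▸ hpm
        have h3 : p.toNat ∣ Int.gcd n m := Int.dvd_gcd h1 h2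
        calc p = ((p.toNat : Nat) : Int) := hp0.symm
          _ ∣ (Int.gcd n m : Int) := Int.natCast_dvd_natCast.2 h3
      have hgle : ¬ 1 < Int.gcd n m := fun hc => h ⟨hc, hn⟩
      have hg0 : Int.gcd n m ≠ 0 := by
        intro hc
        rcases Int.gcd_eq_zero_iff.1 hc with ⟨hn0, _⟩
        omega
      have hle : (Int.gcd n m : Int) ≤ 1 := by omega
      have := Int.le_of_dvd (by omega) hpg
      omega
    · rintro ⟨hpn, _⟩
      exact hpn

-- ========== correctness of B's smallest-prime-factor search ==========
lemma bSpf_go : ∀ f n : Int, 2 ≤ f → 2 ≤ n →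
    (∀ d : Int, 2 ≤ d → d < f → ¬ d ∣ n) →
    2 ≤ bSpf n f ∧ bSpf n f ∣ n ∧ (∀ d : Int, 2 ≤ d → d ∣ n → bSpf n f ≤ d) := by
  intro f n
  fun_induction bSpf n f with
  | case1 f h hmod =>
    intro h2f h2n hsm
    refine ⟨h2f, Int.dvd_of_emod_eq_zero hmod, ?_⟩
    intro d hd2 hdd
    by_contra hlt
    exact hsm d hd2 (by omega) hdd
  | case2 f h hmod ih =>
    intro h2f h2n hsm
    apply ih (by omega) h2n
    intro d hd2 hdf hdd
    by_cases hdeq : d = f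
    · subst hdeq
      exact hmod (Int.emod_eq_zero_of_dvd hdd)
    · exact hsm d hd2 (by omega) hdd
  | case3 f h =>
    intro h2f h2n hsm
    have hnf : n < f * f := by
      by_contra hc
      exact h ⟨by omega, h2f⟩
    refine ⟨h2n, dvd_refl n, ?_⟩
    intro d hd2 hdd
    by_contra hlt
    obtain ⟨m, hm2, hmd, hmm, _⟩ := small_divisor n d (by omega) hd2 (by omega) hdd
    have hmf : m < f := by nlinarith
    exact hsm m hm2 hmf hmd

-- ========== A's fold over prime_factors as a find? ==========
lemma fold_false (mult : Int) (l : List Int) (r : String) :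
    l.foldl (pvAfold mult) (false, r) = (false, r) := by
  induction l with
  | nil => rfl
  | cons f t ih => simpa [pvAfold] using ih

lemma fold_find (mult : Int) (l : List Int) (r : String) :
    l.foldl (pvAfold mult) (true, r)
      = match l.find? (badP mult) with
        | some f => (false, pvMsgF mult f)
        | none => (true, r) := by
  induction l with
  | nil => rfl
  | cons f t ih =>
    by_cases hb : (mult - 1) % f ≠ 0
    · simp [pvAfold, hb, List.find?_cons, badP, fold_false]
    · have hb' : badP mult f = false := by simp [badP, hb]
      simp only [List.foldl_cons, pvAfold, if_pos, if_neg hb, List.find?_cons, hb',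
        cond_false]
      simpa using ih

lemma A_closed (mod mult c : Int) (hg : ¬ Int.gcd mod c ≠ 1) :
    has_complete_cycle mod mult c =
      (match (prime_factors mod).find? (badP mult) with
       | some f => (false, pvMsgF mult f)
       | none => if mod % 4 = 0 ∧ mult % 4 ≠ 1
                 then (false, "4 divides " ++ PySem.Int.toStr mod ++ " but not " ++ PySem.Int.toStr mult ++ " - 1")
                 else (true, "Has complete cycle")) := by
  simp only [has_complete_cycle, hg, if_false, ite_false]
  rw [show (fun (s : Bool × String) (f : Int) =>
      if s.1 then (if (mult - 1) % f ≠ 0 then (false, "factor " ++ PySem.Int.toStr f ++ " does not divide " ++ PySem.Int.toStr mult ++ " - 1") else s) else s) = pvAfold mult from rfl]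
  rw [fold_find]
  cases hf : (prime_factors mod).find? (badP mult) <;> simp

-- in a sorted list, the first element satisfying P is the minimal one
lemma find_sorted (P : Int → Bool) : ∀ L : List Int, L.Pairwise (· < ·) →
    ∀ x : Int, x ∈ L → P x = true → (∀ y ∈ L, y < x → P y = false) →
    L.find? P = some x := by
  intro L hs
  induction L with
  | nil => intro x hx; exact absurd hx (List.not_mem_nil)
  | cons a t ih =>
    intro x hx hPx hmin
    rcases List.pairwise_cons.1 hs with ⟨ha, ht⟩
    by_cases hax : a = x
    · subst hax
      simp [List.find?_cons, hPx]
    · have hxt : x ∈ t := by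
        rcases List.mem_cons.1 hx with h | h
        · exact absurd h.symm hax
        · exact h
      have hax' : a < x := ha x hxt
      have hPa : P a = false := hmin a (List.mem_cons_self) hax'
      rw [List.find?_cons, hPa]
      exact ih ht x hxt hPx (fun y hy hyx => hmin y (List.mem_cons_of_mem _ hy) hyx)

-- ===== VERDICT (by name: the statement is the Claim_ definition above) =====
theorem has_complete_cycle_spec : Claim_equal_has_complete_cycle := by
  intro mod mult c hDom hPre
  unfold Spec_has_complete_cycle
  by_cases hg : Int.gcd mod c ≠ 1
  · simp [has_complete_cycle, has_complete_cycle_alt, hg]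
  · have hm : 1 ≤ mod := by
      unfold Pre_has_complete_cycle at hPre
      rcases hPre with h | h
      · exact h
      · exact absurd h hg
    obtain ⟨L, hLeq, hLs, hLsound, hLcomp⟩ := PF mod hm
    obtain ⟨hr1, hrdvd, hriff⟩ := bReduce_spec (mult - 1) mod hm
    rw [A_closed mod mult c hg, hLeq]
    simp only [has_complete_cycle_alt, hg, if_false, ite_false]
    by_cases hr : 1 < bReduce (mult - 1) mod
    · -- failure: A finds the smallest bad prime = B's spf of the residual
      set r := bReduce (mult - 1) mod with hrdef
      obtain ⟨hs2, hsdvd, hsmin⟩ := bSpf_go 2 r (le_refl 2) (by omega) (by omega)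
      set s := bSpf r 2 with hsdef
      have hsprime : Prime s := by
        apply prime_of_no_small_divisor s hs2
        intro d hd2 hds hdd
        exact absurd (hsmin d hd2 (hdd.trans hsdvd)) (by omega)
      have hsr : s ∣ r := hsdvd
      have hsmod : s ∣ mod ∧ ¬ s ∣ (mult - 1) := (hriff s hs2 hsprime).1 hsr
      have hsL : s ∈ L := hLcomp s hs2 hsprime hsmod.1
      have hsbad : badP mult s = true := by
        cases hb : badP mult s
        · exact absurd ((badP_false_iff mult s).1 hb) hsmod.2
        · rfl
      have hfind : (1 :: L).find? (badP mult) = some s := by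
        have h1 : badP mult 1 = false := (badP_false_iff mult 1).2 (one_dvd _)
        rw [List.find?_cons, h1]
        apply find_sorted (badP mult) L hLs s hsL hsbad
        intro y hy hys
        obtain ⟨hy2, hyp, hymod⟩ := hLsound y hy
        cases hb : badP mult y
        · rfl
        · exfalso
          have hybad : ¬ y ∣ (mult - 1) := by
            intro hd
            rw [(badP_false_iff mult y).2 hd] at hb
            exact Bool.false_ne_true hb
          have hyr : y ∣ r := (hriff y hy2 hyp).2 ⟨hymod, hybad⟩
          exact absurd (hsmin y hy2 hyr) (by omega)
      rw [hfind, if_pos hr]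
      simp [pvMsgF]
    · -- success: r = 1, no prime of mod is bad, both fall through to the mod%4 check
      have hr1' : bReduce (mult - 1) mod = 1 := by omega
      have hfind : (1 :: L).find? (badP mult) = none := by
        apply List.find?_eq_none.2
        intro x hx
        rcases List.mem_cons.1 hx with h | h
        · subst h
          simp [(badP_false_iff mult 1).2 (one_dvd _)]
        · obtain ⟨hx2, hxp, hxmod⟩ := hLsound x h
          by_cases hxd : x ∣ (mult - 1)
          · simp [(badP_false_iff mult x).2 hxd]
          · exfalso
            have : x ∣ bReduce (mult - 1) mod := (hriff x hx2 hxp).2 ⟨hxmod, hxd⟩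
            rw [hr1'] at this
            have := Int.le_of_dvd one_pos this
            omega
      rw [hfind, if_neg hr]
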